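-- pv_equiv track=rewrite | github.com/onyxolu/DSA | Goldman/maximal_commonality.py | maxCommon
-- ===== SOURCE A (Python) =====
-- import collections
--
-- def maxCommon(s):
--     out = 0
--     left = collections.Counter('')
--     right = collections.Counter(s)
--
--     for i,c in enumerate(s):
--         left[c] += 1
--         right[c] -= 1
--
--         out = max(out, sum((left&right).values()))
--
--     return out
-- ===== SOURCE B (Python) =====
-- import collections
--
-- def maxCommon(s):
--     # Incremental: keep cur = sum of min(left[c], right[c]); each step only
--     # the moved char's min-term changes, so update cur in O(1).
--     left = collections.Counter()
--     right = collections.Counter(s)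
--     cur = 0
--     out = 0
--     for c in s:
--         l = left[c]
--         r = right[c]
--         cur += min(l + 1, r - 1) - min(l, r)
--         left[c] = l + 1
--         right[c] = r - 1
--         out = max(out, cur)
--     return out
-- ===== Notes on version B (the rewrite author's own statement) =====
-- stated objective: faster
-- what changed: Instead of recomputing sum((left&right).values()) over all of left's keys at every split, B maintains the intersection-sum incrementally, updating only the moved character's min(left[c], right[c]) term in O(1) per step.
import Mathlib
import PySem

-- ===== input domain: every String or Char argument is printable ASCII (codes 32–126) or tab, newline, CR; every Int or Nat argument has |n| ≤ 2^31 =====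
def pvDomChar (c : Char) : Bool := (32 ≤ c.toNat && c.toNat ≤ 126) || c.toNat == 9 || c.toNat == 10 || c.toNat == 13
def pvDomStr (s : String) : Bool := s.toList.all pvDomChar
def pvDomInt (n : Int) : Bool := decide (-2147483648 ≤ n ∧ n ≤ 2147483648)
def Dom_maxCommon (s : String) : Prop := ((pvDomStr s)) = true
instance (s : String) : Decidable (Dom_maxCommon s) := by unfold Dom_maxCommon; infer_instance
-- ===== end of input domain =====

-- B replaces the per-split recomputation of sum((left&right).values()) by an O(1)
-- incremental update of that sum (only the moved char's min-term changes): alternative, asymptotically faster loop body.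

-- ===== PORT A =====
-- Counter.__and__ then .values(): keep min(count, other[elem]) where positive, in left's key order.
def pvCounterAnd (a b : PySem.Dict Char Int) : PySem.Dict Char Int :=
  PySem.Dict.mk (a.items.filterMap (fun kv =>
    if 0 < min kv.2 (b.getD kv.1 0) then some (kv.1, min kv.2 (b.getD kv.1 0)) else none))

-- loop body of A: left[c] += 1; right[c] -= 1; out = max(out, sum((left&right).values()))
def pvStepA (st : Int × PySem.Dict Char Int × PySem.Dict Char Int) (ic : Int × Char) :
    Int × PySem.Dict Char Int × PySem.Dict Char Int :=
  let left := st.2.1.insert ic.2 (st.2.1.getD ic.2 0 + 1)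
  let right := st.2.2.insert ic.2 (st.2.2.getD ic.2 0 - 1)
  (max st.1 ((pvCounterAnd left right).values).sum, left, right)

def maxCommon (s : String) : Int :=
  ((PySem.List.enumerate s.toList).foldl pvStepA
    (0, PySem.Dict.empty, PySem.Dict.counter s.toList)).1

-- ===== PORT B =====
-- loop body of B: read l, r; cur += min(l+1, r-1) - min(l, r); write back; out = max(out, cur)
def pvStepB (st : Int × Int × PySem.Dict Char Int × PySem.Dict Char Int) (c : Char) :
    Int × Int × PySem.Dict Char Int × PySem.Dict Char Int :=
  let l := st.2.2.1.getD c 0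
  let r := st.2.2.2.getD c 0
  let cur := st.2.1 + (min (l + 1) (r - 1) - min l r)
  (max st.1 cur, cur, st.2.2.1.insert c (l + 1), st.2.2.2.insert c (r - 1))

def maxCommon_alt (s : String) : Int :=
  (s.toList.foldl pvStepB (0, 0, PySem.Dict.empty, PySem.Dict.counter s.toList)).1

-- ===== PRECONDITION & SPEC =====
def Spec_maxCommon (s : String) (out : Int) : Prop := out = maxCommon_alt s
instance (s : String) (out : Int) : Decidable (Spec_maxCommon s out) := by unfold Spec_maxCommon; infer_instance

-- ===== CLAIM (what is proved, stated in full; the proofs are below) =====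
def Claim_equal_maxCommon : Prop := ∀ (s : String), Dom_maxCommon s → Spec_maxCommon s (maxCommon s)

-- ===== LEMMAS AND PROOFS =====

-- the contribution of one (key, value) item of `left` to sum((left&right).values())
def pvTerm (b : PySem.Dict Char Int) (kv : Char × Int) : Int :=
  if 0 < min kv.2 (b.getD kv.1 0) then min kv.2 (b.getD kv.1 0) else 0

lemma pvSum_counterAnd (a b : PySem.Dict Char Int) :
    ((pvCounterAnd a b).values).sum = (a.items.map (pvTerm b)).sum := by
  show ((PySem.Dict.mk _).values).sum = _
  rw [PySem.Dict.values_mk]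
  induction a.items with
  | nil => rfl
  | cons kv L ih =>
      by_cases h : 0 < min kv.2 (b.getD kv.1 0)
      · simp only [List.filterMap_cons, if_pos h, List.map_cons, List.sum_cons, ih]
        show min kv.2 (b.getD kv.1 0) + _ = pvTerm b kv + _
        unfold pvTerm
        rw [if_pos h]
      · simp only [List.filterMap_cons, if_neg h, List.map_cons, List.sum_cons, ih]
        show _ = pvTerm b kv + _
        unfold pvTerm
        rw [if_neg h, zero_add]

lemma pvMap_term_congr (L : List (Char × Int)) (c : Char) (w : Int)
    (b : PySem.Dict Char Int) (h : ∀ kv ∈ L, kv.1 ≠ c) :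
    L.map (pvTerm (b.insert c w)) = L.map (pvTerm b) := by
  refine List.map_congr_left (fun kv hkv => ?_)
  unfold pvTerm
  rw [PySem.Dict.getD_insert, if_neg (h kv hkv)]

lemma pvMap_replace_id (L : List (Char × Int)) (c : Char) (x : Int)
    (h : ∀ kv ∈ L, kv.1 ≠ c) :
    L.map (fun p => if p.1 == c then (c, x) else p) = L := by
  have heq : L.map (fun p => if p.1 == c then (c, x) else p) = L.map id :=
    List.map_congr_left (fun kv hkv => by simp [h kv hkv])
  rw [heq, List.map_id]

lemma pvSum_replace (L : List (Char × Int)) (c : Char) (v x w : Int)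
    (b : PySem.Dict Char Int)
    (hn : (L.map Prod.fst).Nodup) (hmem : (c, v) ∈ L) :
    ((L.map (fun p => if p.1 == c then (c, x) else p)).map (pvTerm (b.insert c w))).sum
      = (L.map (pvTerm b)).sum - pvTerm b (c, v) + pvTerm (b.insert c w) (c, x) := by
  induction L with
  | nil => cases hmem
  | cons kv L ih =>
      simp only [List.map_cons, List.sum_cons, List.nodup_cons] at hn ⊢
      by_cases hc : kv.1 = c
      · -- head is the c-entry; all tail keys differ from c
        have htail : ∀ p ∈ L, p.1 ≠ c := by
          intro p hp hpc
          exact hn.1 (List.mem_map.mpr ⟨p, hp, by rw [hpc, hc]⟩)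
        have hv : kv = (c, v) := by
          rcases List.mem_cons.mp hmem with h | h
          · exact h.symm
          · exact absurd rfl (htail _ h)
        rw [if_pos (by simp [hc]), pvMap_replace_id L c x htail,
            pvMap_term_congr L c w b htail, hv]
        ring
      · have hmem' : (c, v) ∈ L := by
          rcases List.mem_cons.mp hmem with h | h
          · exact absurd (congrArg Prod.fst h).symm hc
          · exact h
        rw [if_neg (by simp [hc])]
        have hterm : pvTerm (b.insert c w) kv = pvTerm b kv := by
          unfold pvTerm
          rw [PySem.Dict.getD_insert, if_neg hc]
        rw [hterm, ih hn.2 hmem']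
        ring

-- A's recomputed intersection-sum changes by exactly the positive-part delta of char c's term
lemma pvAndSum_step (la ra : PySem.Dict Char Int) (c : Char) (hn : la.keys.Nodup) :
    (((la.insert c (la.getD c 0 + 1)).items.map
        (pvTerm (ra.insert c (ra.getD c 0 - 1)))).sum)
      = (la.items.map (pvTerm ra)).sum
        + (pvTerm (ra.insert c (ra.getD c 0 - 1)) (c, la.getD c 0 + 1)
            - pvTerm ra (c, la.getD c 0)) := by
  by_cases hcon : la.contains c = true
  · -- existing key: the item list is rewritten in place
    obtain ⟨v, hv⟩ : ∃ v, la.get? c = some v := by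
      rcases h : la.get? c with _ | v
      · rw [PySem.Dict.get?_eq_none_iff_contains] at h; simp [hcon] at h
      · exact ⟨v, rfl⟩
    have hitems := PySem.Dict.mem_items_of_get?_eq_some la hv
    have hvD : la.getD c 0 = v := PySem.Dict.getD_of_mem_items la hitems hn 0
    rw [PySem.Dict.items_insert_of_contains la (la.getD c 0 + 1) hcon,
        pvSum_replace la.items c v (la.getD c 0 + 1) (ra.getD c 0 - 1) ra hn
          (hvD ▸ hitems)]
    rw [hvD]
    ring
  · -- fresh key: appended at the end; its old contribution is pvTerm ra (c, 0) = 0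
    have hcon' : la.contains c = false := by
      cases h : la.contains c with
      | true => exact absurd h hcon
      | false => rfl
    have hkeys : ∀ kv ∈ la.items, kv.1 ≠ c := by
      intro kv hkv hkc
      have : la.contains c = true := by
        rw [PySem.Dict.contains_iff_mem_keys]
        exact hkc ▸ PySem.Dict.mem_keys_of_mem_items la hkv
      simp [hcon'] at this
    have hl0 : la.getD c 0 = 0 := PySem.Dict.getD_of_not_contains la 0 hcon'
    rw [PySem.Dict.items_insert_of_not_contains la (la.getD c 0 + 1) hcon', List.map_append, List.sum_append,
        pvMap_term_congr la.items c (ra.getD c 0 - 1) ra hkeys]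
    have h0 : pvTerm ra (c, la.getD c 0) = 0 := by
      unfold pvTerm
      rw [hl0]
      simp only
      split_ifs with h
      · exfalso; have := min_le_left (0 : Int) (ra.getD c 0); omega
      · rfl
    simp only [List.map_cons, List.map_nil, List.sum_cons, List.sum_nil, h0]
    ring

-- main loop invariant: A's fold and B's fold stay in step
lemma pvLoop_eq : ∀ (q : List Char) (i : Int) (outv curv : Int)
    (la ra lb rb : PySem.Dict Char Int),
    la.keys.Nodup →
    (∀ k, la.getD k 0 = lb.getD k 0) →
    (∀ k, ra.getD k 0 = rb.getD k 0) →
    (∀ k, 0 ≤ la.getD k 0) →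
    (∀ k, (q.count k : Int) ≤ ra.getD k 0) →
    (la.items.map (pvTerm ra)).sum = curv →
    ((PySem.List.enumerate q i).foldl pvStepA (outv, la, ra)).1
      = (q.foldl pvStepB (outv, curv, lb, rb)).1 := by
  intro q
  induction q with
  | nil => intro _ _ _ _ _ _ _ _ _ _ _ _ _; rfl
  | cons c q ih =>
      intro i outv curv la ra lb rb hn hl hr hpos hcnt hsum
      rw [PySem.List.enumerate_cons, List.foldl_cons, List.foldl_cons]
      have hc1 : (1 : Int) ≤ ra.getD c 0 := by
        have := hcnt c
        simp at this
        omega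
      have hlpos := hpos c
      have hnewsum : ((la.insert c (la.getD c 0 + 1)).items.map
            (pvTerm (ra.insert c (ra.getD c 0 - 1)))).sum
          = curv + (min (la.getD c 0 + 1) (ra.getD c 0 - 1)
              - min (la.getD c 0) (ra.getD c 0)) := by
        rw [pvAndSum_step la ra c hn, hsum]
        have h1 : pvTerm (ra.insert c (ra.getD c 0 - 1)) (c, la.getD c 0 + 1)
            = min (la.getD c 0 + 1) (ra.getD c 0 - 1) := by
          unfold pvTerm
          simp only
          rw [PySem.Dict.getD_insert, if_pos rfl]
          split_ifs with h
          · rfl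
          · omega
        have h0 : pvTerm ra (c, la.getD c 0) = min (la.getD c 0) (ra.getD c 0) := by
          unfold pvTerm
          simp only
          split_ifs with h
          · rfl
          · omega
        rw [h1, h0]
      have hA : pvStepA (outv, la, ra) (i, c)
          = (max outv (curv + (min (la.getD c 0 + 1) (ra.getD c 0 - 1)
                - min (la.getD c 0) (ra.getD c 0))),
             la.insert c (la.getD c 0 + 1), ra.insert c (ra.getD c 0 - 1)) := by
        show (max outv ((pvCounterAnd (la.insert c (la.getD c 0 + 1))
                (ra.insert c (ra.getD c 0 - 1))).values).sum, _, _) = _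
        rw [pvSum_counterAnd, hnewsum]
      have hB : pvStepB (outv, curv, lb, rb) c
          = (max outv (curv + (min (la.getD c 0 + 1) (ra.getD c 0 - 1)
                - min (la.getD c 0) (ra.getD c 0))),
             curv + (min (la.getD c 0 + 1) (ra.getD c 0 - 1)
                - min (la.getD c 0) (ra.getD c 0)),
             lb.insert c (la.getD c 0 + 1), rb.insert c (ra.getD c 0 - 1)) := by
        show (max outv (curv + (min (lb.getD c 0 + 1) (rb.getD c 0 - 1)
                - min (lb.getD c 0) (rb.getD c 0))),
              curv + (min (lb.getD c 0 + 1) (rb.getD c 0 - 1)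
                - min (lb.getD c 0) (rb.getD c 0)),
              lb.insert c (lb.getD c 0 + 1), rb.insert c (rb.getD c 0 - 1)) = _
        rw [hl c, hr c]
      rw [hA, hB]
      apply ih (i + 1)
      · exact PySem.Dict.nodup_keys_insert la c _ hn
      · intro k
        rw [PySem.Dict.getD_insert, PySem.Dict.getD_insert, hl k]
      · intro k
        rw [PySem.Dict.getD_insert, PySem.Dict.getD_insert, hr k]
      · intro k
        rw [PySem.Dict.getD_insert]
        split_ifs with h
        · omega
        · exact hpos k
      · intro k
        rw [PySem.Dict.getD_insert]
        have := hcnt k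
        by_cases h : k = c
        · subst h
          rw [if_pos rfl]
          simp at this
          omega
        · rw [if_neg h]
          simp [List.count_cons] at this ⊢
          omega
      · exact hnewsum

-- ===== VERDICT (by name: the statement is the Claim_ definition above) =====
theorem maxCommon_spec : Claim_equal_maxCommon := by
  intro s _
  show maxCommon s = maxCommon_alt s
  unfold maxCommon maxCommon_alt
  exact pvLoop_eq s.toList 0 0 0 PySem.Dict.empty (PySem.Dict.counter s.toList)
    PySem.Dict.empty (PySem.Dict.counter s.toList)
    PySem.Dict.nodup_keys_empty
    (fun _ => rfl) (fun _ => rfl)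
    (fun k => by simp [PySem.Dict.getD_empty])
    (fun k => by simp [PySem.Dict.getD_counter])
    rfl
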